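-- pv_equiv track=rewrite | github.com/Nicoezg/TDA-Buchwald-2024-2C | PD/juego_gemelas.py | plan_operativo3
-- ===== SOURCE A (Python) =====
-- def plan_operativo3(arreglo_L, arreglo_C, costo_M):
--     n = len(arreglo_L)
--     OPT_L = [0] * n
--     OPT_C = [0] * n
--
--     OPT_L[0] = arreglo_L[0]
--     OPT_C[0] = arreglo_C[0]
--
--     for i in range(1, n):
--         OPT_L[i] = min(OPT_L[i-1] + arreglo_L[i], OPT_C[i-1] + arreglo_L[i] + costo_M)
--         OPT_C[i] = min(OPT_C[i-1] + arreglo_C[i], OPT_L[i-1] + arreglo_C[i] + costo_M)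
--
--     # Reconstruccion de la solucion
--     secuencia_localizaciones = [None] * n
--     if OPT_L[-1] <= OPT_C[-1]:
--         secuencia_localizaciones[-1] = "londres"
--     else:
--         secuencia_localizaciones[-1] = "california"
--
--     i = n-1
--     while i > 0:
--         if secuencia_localizaciones[i] == "londres":
--             if OPT_L[i] == OPT_L[i-1] + arreglo_L[i]:
--                 secuencia_localizaciones[i-1] = "londres"
--             else:
--                 secuencia_localizaciones[i-1] = "california"
--         else:
--             if OPT_C[i] == OPT_C[i-1] + arreglo_C[i]:
--                 secuencia_localizaciones[i-1] = "california"
--             else: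
--                 secuencia_localizaciones[i-1] = "londres"
--         i -= 1
--
--     return secuencia_localizaciones
-- ===== SOURCE B (Python) =====
-- def plan_operativo3(arreglo_L, arreglo_C, costo_M):
--     # Single forward pass that carries, for each of the two states, the full best
--     # plan built so far; no backward reconstruction pass at all.
--     costL, planL = arreglo_L[0], ["londres"]
--     costC, planC = arreglo_C[0], ["california"]
--     for l, c in zip(arreglo_L[1:], arreglo_C[1:len(arreglo_L)]):
--         sL, mL = costL + l, costC + l + costo_M
--         sC, mC = costC + c, costL + c + costo_M
--         newL = (planL if sL <= mL else planC) + ["londres"]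
--         newC = (planC if sC <= mC else planL) + ["california"]
--         costL, planL = min(sL, mL), newL
--         costC, planC = min(sC, mC), newC
--     return planL if costL <= costC else planC
-- ===== Notes on version B (the rewrite author's own statement) =====
-- stated objective: simpler
-- what changed: Replaces A's two full DP tables plus a separate backward reconstruction pass (re-testing cost equalities) with a single forward pass that carries, for each of the two states, the complete best plan built so far, so the answer is read off directly with no reconstruction.
import Mathlib
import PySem

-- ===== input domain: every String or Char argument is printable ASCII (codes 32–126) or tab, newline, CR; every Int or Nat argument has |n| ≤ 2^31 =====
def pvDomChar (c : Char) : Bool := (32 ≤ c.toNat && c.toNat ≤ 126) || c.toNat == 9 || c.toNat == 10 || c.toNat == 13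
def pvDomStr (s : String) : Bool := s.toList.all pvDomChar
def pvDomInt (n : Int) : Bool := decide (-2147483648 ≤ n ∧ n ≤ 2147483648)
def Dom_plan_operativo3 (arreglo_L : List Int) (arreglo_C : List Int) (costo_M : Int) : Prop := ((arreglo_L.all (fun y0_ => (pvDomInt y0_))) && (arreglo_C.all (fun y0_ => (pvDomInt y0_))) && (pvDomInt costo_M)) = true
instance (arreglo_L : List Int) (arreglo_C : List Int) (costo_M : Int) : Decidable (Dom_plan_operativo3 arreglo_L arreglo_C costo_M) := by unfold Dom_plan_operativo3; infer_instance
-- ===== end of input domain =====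

-- B replaces A's two DP tables + backward reconstruction pass by a single forward pass that
-- carries the complete best plan for each of the two states (objective: simpler; no speed claim).

-- ===== PORT A =====
def plan_operativo3 (arreglo_L : List Int) (arreglo_C : List Int) (costo_M : Int) : List String :=
  let n := arreglo_L.length
  -- OPT_L = [0]*n; OPT_L[0] = arreglo_L[0] (the index-0 store is a no-op at n = 0, where Python raises)
  let OPT_L0 := (List.replicate n (0 : Int)).set 0 (PySem.List.pyGetD arreglo_L 0 0)
  let OPT_C0 := (List.replicate n (0 : Int)).set 0 (PySem.List.pyGetD arreglo_C 0 0)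
  let OPT := (PySem.List.pyRange 1 (n : Int) 1).foldl (fun (st : List Int × List Int) i =>
      let vL := min (PySem.List.pyGetD st.1 (i-1) 0 + PySem.List.pyGetD arreglo_L i 0)
                    (PySem.List.pyGetD st.2 (i-1) 0 + PySem.List.pyGetD arreglo_L i 0 + costo_M)
      let vC := min (PySem.List.pyGetD st.2 (i-1) 0 + PySem.List.pyGetD arreglo_C i 0)
                    (PySem.List.pyGetD st.1 (i-1) 0 + PySem.List.pyGetD arreglo_C i 0 + costo_M)
      (st.1.set i.toNat vL, st.2.set i.toNat vC)) (OPT_L0, OPT_C0)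
  -- secuencia = [None]*n modelled with "" placeholders; each is overwritten before being read.
  -- secuencia[-1] = … : Python index -1 is index n-1.
  let seq0 := (List.replicate n "").set (n-1)
      (if PySem.List.pyGetD OPT.1 (-1) 0 ≤ PySem.List.pyGetD OPT.2 (-1) 0 then "londres" else "california")
  -- while i > 0 loop, i = n-1, n-2, …, 1
  (PySem.List.pyRange ((n : Int) - 1) 0 (-1)).foldl (fun seq i =>
      let v := if PySem.List.pyGetD seq i "" == "londres" then
          (if PySem.List.pyGetD OPT.1 i 0 == PySem.List.pyGetD OPT.1 (i-1) 0 + PySem.List.pyGetD arreglo_L i 0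
           then "londres" else "california")
        else
          (if PySem.List.pyGetD OPT.2 i 0 == PySem.List.pyGetD OPT.2 (i-1) 0 + PySem.List.pyGetD arreglo_C i 0
           then "california" else "londres")
      seq.set (i-1).toNat v) seq0

-- ===== PORT B =====
def plan_operativo3_alt (arreglo_L : List Int) (arreglo_C : List Int) (costo_M : Int) : List String :=
  -- forward pass over zip(arreglo_L[1:], arreglo_C[1:len(arreglo_L)]) carrying
  -- (costL, planL, costC, planC); the plans are complete lists of choices so far
  let st := ((PySem.List.slice arreglo_L (some 1) none).zip
             (PySem.List.slice arreglo_C (some 1) (some (arreglo_L.length : Int)))).foldl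
      (fun (st : Int × List String × Int × List String) lc =>
        let sL := st.1 + lc.1
        let mL := st.2.2.1 + lc.1 + costo_M
        let sC := st.2.2.1 + lc.2
        let mC := st.1 + lc.2 + costo_M
        (min sL mL, (if sL ≤ mL then st.2.1 else st.2.2.2) ++ ["londres"],
         min sC mC, (if sC ≤ mC then st.2.2.2 else st.2.1) ++ ["california"]))
      (PySem.List.pyGetD arreglo_L 0 0, ["londres"], PySem.List.pyGetD arreglo_C 0 0, ["california"])
  if st.1 ≤ st.2.2.1 then st.2.1 else st.2.2.2

-- ===== PRECONDITION & SPEC =====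
-- Pre_ excludes exactly the inputs where A raises IndexError: an empty arreglo_L
-- (arreglo_L[0]) or an arreglo_C shorter than arreglo_L (arreglo_C[i], i < len(arreglo_L)).
def Pre_plan_operativo3 (arreglo_L : List Int) (arreglo_C : List Int) (costo_M : Int) : Prop :=
  arreglo_L ≠ [] ∧ arreglo_L.length ≤ arreglo_C.length
instance (arreglo_L : List Int) (arreglo_C : List Int) (costo_M : Int) : Decidable (Pre_plan_operativo3 arreglo_L arreglo_C costo_M) := by unfold Pre_plan_operativo3; infer_instance

def pvWitness_plan_operativo3 : List Int × List Int × Int := ([1, 2], [2, 1], 1)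

def Spec_plan_operativo3 (arreglo_L : List Int) (arreglo_C : List Int) (costo_M : Int) (out : List String) : Prop := out = plan_operativo3_alt arreglo_L arreglo_C costo_M
instance (arreglo_L : List Int) (arreglo_C : List Int) (costo_M : Int) (out : List String) : Decidable (Spec_plan_operativo3 arreglo_L arreglo_C costo_M out) := by unfold Spec_plan_operativo3; infer_instance

-- ===== CLAIM (what is proved, stated in full; the proofs are below) =====
def Claim_equal_plan_operativo3 : Prop := ∀ (arreglo_L : List Int) (arreglo_C : List Int) (costo_M : Int), Dom_plan_operativo3 arreglo_L arreglo_C costo_M → Pre_plan_operativo3 arreglo_L arreglo_C costo_M → Spec_plan_operativo3 arreglo_L arreglo_C costo_M (plan_operativo3 arreglo_L arreglo_C costo_M)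

-- ===== LEMMAS AND PROOFS =====

-- reference DP value at index i: (OPT_L[i], OPT_C[i])
def optP (aL aC : List Int) (m : Int) : Nat → Int × Int
  | 0 => (PySem.List.pyGetD aL 0 0, PySem.List.pyGetD aC 0 0)
  | i+1 =>
    let p := optP aL aC m i
    (min (p.1 + PySem.List.pyGetD aL ((i : Int) + 1) 0) (p.2 + PySem.List.pyGetD aL ((i : Int) + 1) 0 + m),
     min (p.2 + PySem.List.pyGetD aC ((i : Int) + 1) 0) (p.1 + PySem.List.pyGetD aC ((i : Int) + 1) 0 + m))

-- reference parent pointers for index i+1 (true = the "stay" branch attains the min)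
def ptrAt (aL aC : List Int) (m : Int) (i : Nat) : Bool × Bool :=
  (decide ((optP aL aC m i).1 + PySem.List.pyGetD aL ((i : Int) + 1) 0
           ≤ (optP aL aC m i).2 + PySem.List.pyGetD aL ((i : Int) + 1) 0 + m),
   decide ((optP aL aC m i).2 + PySem.List.pyGetD aC ((i : Int) + 1) 0
           ≤ (optP aL aC m i).1 + PySem.List.pyGetD aC ((i : Int) + 1) 0 + m))

-- reference reconstruction: choices for indices 0..i given that index i's choice is ch (true = londres)
def refRec (aL aC : List Int) (m : Int) : Nat → Bool → List String
  | 0, ch => [if ch then "londres" else "california"]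
  | i+1, ch =>
    refRec aL aC m i (if ch then (ptrAt aL aC m i).1 else !(ptrAt aL aC m i).2)
      ++ [if ch then "londres" else "california"]

theorem min_beq_left (a b : Int) : (min a b == a) = decide (a ≤ b) := by
  by_cases h : a ≤ b
  · simp [h]
  · have hb : min a b = b := min_eq_right (le_of_not_ge h)
    simp only [hb]
    simp [show b ≠ a from by omega, h]

-- forward fold characterization (B): costs are the DP optima, plans are the reference plans
theorem fwB_spec (aL aC : List Int) (m : Int) (h2 : aL.length ≤ aC.length) :
    ∀ k, k ≤ aL.length - 1 →
    ((aL.tail.zip ((aC.drop 1).take (aL.length - 1))).take k).foldl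
      (fun (st : Int × List String × Int × List String) lc =>
        let sL := st.1 + lc.1
        let mL := st.2.2.1 + lc.1 + m
        let sC := st.2.2.1 + lc.2
        let mC := st.1 + lc.2 + m
        (min sL mL, (if sL ≤ mL then st.2.1 else st.2.2.2) ++ ["londres"],
         min sC mC, (if sC ≤ mC then st.2.2.2 else st.2.1) ++ ["california"]))
      (PySem.List.pyGetD aL 0 0, ["londres"], PySem.List.pyGetD aC 0 0, ["california"])
    = ((optP aL aC m k).1, refRec aL aC m k true, (optP aL aC m k).2, refRec aL aC m k false) := by
  intro k
  induction k with
  | zero => intro _; simp [optP, refRec]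
  | succ k ih =>
    intro hk
    have hlen : (aL.tail.zip ((aC.drop 1).take (aL.length - 1))).length = aL.length - 1 := by
      simp [List.length_zip]; omega
    have hk' : k < (aL.tail.zip ((aC.drop 1).take (aL.length - 1))).length := by omega
    rw [List.take_add_one, List.getElem?_eq_getElem hk']
    have hpair : (aL.tail.zip ((aC.drop 1).take (aL.length - 1)))[k] =
        (PySem.List.pyGetD aL ((k : Int) + 1) 0, PySem.List.pyGetD aC ((k : Int) + 1) 0) := by
      have h1 : (k+1) < aL.length := by omega
      have h1' : (k+1) < aC.length := by omega
      rw [List.getElem_zip]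
      have : ((k : Int) + 1) = ((k + 1 : Nat) : Int) := by push_cast; ring
      rw [this, PySem.List.pyGetD_natCast, PySem.List.pyGetD_natCast]
      simp [List.getElem_tail, List.getD_eq_getElem?_getD, List.getElem?_eq_getElem h1,
        List.getElem?_eq_getElem h1']
    rw [List.foldl_append, ih (by omega), hpair]
    simp only [List.foldl_cons, List.foldl_nil]
    have hL : (if (optP aL aC m k).1 + PySem.List.pyGetD aL ((k : Int) + 1) 0
          ≤ (optP aL aC m k).2 + PySem.List.pyGetD aL ((k : Int) + 1) 0 + m
        then refRec aL aC m k true else refRec aL aC m k false)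
        = refRec aL aC m k (ptrAt aL aC m k).1 := by
      unfold ptrAt; split_ifs with h <;> simp [h]
    have hC : (if (optP aL aC m k).2 + PySem.List.pyGetD aC ((k : Int) + 1) 0
          ≤ (optP aL aC m k).1 + PySem.List.pyGetD aC ((k : Int) + 1) 0 + m
        then refRec aL aC m k false else refRec aL aC m k true)
        = refRec aL aC m k (!(ptrAt aL aC m k).2) := by
      unfold ptrAt; split_ifs with h <;> simp [h]
    simp only [optP]
    exact congrArg₂ _ rfl (congrArg₂ _ (by rw [hL]; simp [refRec])
      (congrArg₂ _ rfl (by rw [hC]; simp [refRec])))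

theorem B_eq_ref (aL aC : List Int) (m : Int) (h1 : aL ≠ []) (h2 : aL.length ≤ aC.length) :
    plan_operativo3_alt aL aC m
      = refRec aL aC m (aL.length - 1)
          (decide ((optP aL aC m (aL.length - 1)).1 ≤ (optP aL aC m (aL.length - 1)).2)) := by
  have hn : 0 < aL.length := List.length_pos_iff.mpr h1
  have hsl : ((PySem.List.slice aL (some 1) none).zip
      (PySem.List.slice aC (some 1) (some (aL.length : Int)))) =
      aL.tail.zip ((aC.drop 1).take (aL.length - 1)) := by
    rw [PySem.List.slice_from_one, PySem.List.slice_toNat _ (by omega) (by omega)]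
    norm_num
  have htake : (aL.tail.zip ((aC.drop 1).take (aL.length - 1))).take (aL.length - 1)
      = aL.tail.zip ((aC.drop 1).take (aL.length - 1)) := by
    refine List.take_of_length_le ?_
    simp [List.length_zip]
  have hfw := fwB_spec aL aC m h2 (aL.length - 1) le_rfl
  rw [htake] at hfw
  unfold plan_operativo3_alt
  simp only [hsl, hfw]
  split_ifs with h <;> simp [h]

def stepAF (aL aC : List Int) (m : Int) (st : List Int × List Int) (i : Int) : List Int × List Int :=
  let vL := min (PySem.List.pyGetD st.1 (i-1) 0 + PySem.List.pyGetD aL i 0)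
                (PySem.List.pyGetD st.2 (i-1) 0 + PySem.List.pyGetD aL i 0 + m)
  let vC := min (PySem.List.pyGetD st.2 (i-1) 0 + PySem.List.pyGetD aC i 0)
                (PySem.List.pyGetD st.1 (i-1) 0 + PySem.List.pyGetD aC i 0 + m)
  (st.1.set i.toNat vL, st.2.set i.toNat vC)

theorem getD_set_self (xs : List Int) (i : Nat) (v : Int) (h : i < xs.length) :
    (xs.set i v).getD i 0 = v := by
  simp [List.getD_eq_getElem?_getD, List.getElem?_set, h]

theorem getD_set_ne (xs : List Int) (i j : Nat) (v : Int) (h : i ≠ j) :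
    (xs.set i v).getD j 0 = xs.getD j 0 := by
  simp [List.getD_eq_getElem?_getD, List.getElem?_set, h]

theorem fwA_spec (aL aC : List Int) (m : Int) (h1 : 0 < aL.length) :
    ∀ k, k ≤ aL.length →
    ((PySem.List.pyRange 1 (k : Int) 1).foldl (stepAF aL aC m)
        ((List.replicate aL.length (0 : Int)).set 0 (PySem.List.pyGetD aL 0 0),
         (List.replicate aL.length (0 : Int)).set 0 (PySem.List.pyGetD aC 0 0))).1.length = aL.length ∧
    ((PySem.List.pyRange 1 (k : Int) 1).foldl (stepAF aL aC m)
        ((List.replicate aL.length (0 : Int)).set 0 (PySem.List.pyGetD aL 0 0),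
         (List.replicate aL.length (0 : Int)).set 0 (PySem.List.pyGetD aC 0 0))).2.length = aL.length ∧
    ∀ j, j < k →
      ((PySem.List.pyRange 1 (k : Int) 1).foldl (stepAF aL aC m)
        ((List.replicate aL.length (0 : Int)).set 0 (PySem.List.pyGetD aL 0 0),
         (List.replicate aL.length (0 : Int)).set 0 (PySem.List.pyGetD aC 0 0))).1.getD j 0 = (optP aL aC m j).1 ∧
      ((PySem.List.pyRange 1 (k : Int) 1).foldl (stepAF aL aC m)
        ((List.replicate aL.length (0 : Int)).set 0 (PySem.List.pyGetD aL 0 0),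
         (List.replicate aL.length (0 : Int)).set 0 (PySem.List.pyGetD aC 0 0))).2.getD j 0 = (optP aL aC m j).2 := by
  intro k
  induction k with
  | zero =>
    intro _
    rw [PySem.List.pyRange_one_eq_nil (by omega)]
    simp only [List.foldl_nil]
    refine ⟨by simp, by simp, fun j hj => absurd hj (by omega)⟩
  | succ k ih =>
    intro hk
    by_cases hk0 : k = 0
    · subst hk0
      rw [show ((0 + 1 : Nat) : Int) = 1 by norm_num, PySem.List.pyRange_one_eq_nil (by omega)]
      simp only [List.foldl_nil]
      refine ⟨by simp, by simp, fun j hj => ?_⟩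
      have hj0 : j = 0 := by omega
      subst hj0
      constructor
      · rw [getD_set_self _ _ _ (by simpa using h1)]; rfl
      · rw [getD_set_self _ _ _ (by simpa using h1)]; rfl
    · have hk1 : 1 ≤ k := by omega
      obtain ⟨ih1, ih2, ih3⟩ := ih (by omega)
      have hsplit : PySem.List.pyRange 1 ((k + 1 : Nat) : Int) 1
          = PySem.List.pyRange 1 (k : Nat) 1 ++ [(k : Int)] := by
        have : ((k + 1 : Nat) : Int) = (k : Int) + 1 := by push_cast; ring
        rw [this, PySem.List.pyRange_one_succ_right (by exact_mod_cast hk1)]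
      rw [hsplit, List.foldl_append]
      set st := (PySem.List.pyRange 1 (k : Int) 1).foldl (stepAF aL aC m)
        ((List.replicate aL.length (0 : Int)).set 0 (PySem.List.pyGetD aL 0 0),
         (List.replicate aL.length (0 : Int)).set 0 (PySem.List.pyGetD aC 0 0)) with hst
      obtain ⟨k', rfl⟩ : ∃ k', k = k' + 1 := ⟨k - 1, by omega⟩
      have hread : ((k' + 1 : Nat) : Int) - 1 = ((k' : Nat) : Int) := by push_cast; ring
      have hgetL : PySem.List.pyGetD st.1 (((k' + 1 : Nat) : Int) - 1) 0 = (optP aL aC m k').1 := by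
        rw [hread, PySem.List.pyGetD_natCast]; exact (ih3 k' (by omega)).1
      have hgetC : PySem.List.pyGetD st.2 (((k' + 1 : Nat) : Int) - 1) 0 = (optP aL aC m k').2 := by
        rw [hread, PySem.List.pyGetD_natCast]; exact (ih3 k' (by omega)).2
      have hcast : ((k' + 1 : Nat) : Int) = ((k' : Nat) : Int) + 1 := by push_cast; ring
      have hstep : stepAF aL aC m st ((k' + 1 : Nat) : Int)
          = (st.1.set (k' + 1) (optP aL aC m (k' + 1)).1,
             st.2.set (k' + 1) (optP aL aC m (k' + 1)).2) := by
        simp only [stepAF, hgetL, hgetC]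
        rw [show (((k' + 1 : Nat) : Int)).toNat = k' + 1 by omega]
        simp only [optP, hcast]
      rw [List.foldl_cons, List.foldl_nil, hstep]
      refine ⟨by simpa using ih1, by simpa using ih2, fun j hj => ?_⟩
      by_cases hjk : j = k' + 1
      · subst hjk
        exact ⟨getD_set_self _ _ _ (by omega), getD_set_self _ _ _ (by omega)⟩
      · rw [getD_set_ne _ _ _ _ (by omega), getD_set_ne _ _ _ _ (by omega)]
        exact ih3 j (by omega)

theorem set_last_of_length (l : List String) (i : Nat) (v : String) (h : l.length = i + 1) :
    l.set i v = l.take i ++ [v] := by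
  rw [List.set_eq_take_append_cons_drop, if_pos (by omega)]
  have : l.drop (i+1) = [] := List.drop_eq_nil_of_le (by omega)
  simp [this]

theorem getD_append_length (pad : List String) (x : String) (t : List String) (d : String) :
    (pad ++ x :: t).getD pad.length d = x := by
  simp [List.getD_eq_getElem?_getD, List.getElem?_append_right (le_refl pad.length)]

def stepRF (aL aC : List Int) (m : Int) (OL OC : List Int) (seq : List String) (i : Int) : List String :=
  let v := if PySem.List.pyGetD seq i "" == "londres" then
      (if PySem.List.pyGetD OL i 0 == PySem.List.pyGetD OL (i-1) 0 + PySem.List.pyGetD aL i 0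
       then "londres" else "california")
    else
      (if PySem.List.pyGetD OC i 0 == PySem.List.pyGetD OC (i-1) 0 + PySem.List.pyGetD aC i 0
       then "california" else "londres")
  seq.set (i-1).toNat v

theorem bkA_spec (aL aC : List Int) (m : Int) (OL OC : List Int)
    (hOL : ∀ j, j < aL.length → OL.getD j 0 = (optP aL aC m j).1)
    (hOC : ∀ j, j < aL.length → OC.getD j 0 = (optP aL aC m j).2) :
    ∀ (i : Nat) (ch : Bool) (pad tail : List String), pad.length = i →
      i + 1 + tail.length = aL.length →
      (PySem.List.pyRange (i : Int) 0 (-1)).foldl (stepRF aL aC m OL OC)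
        (pad ++ (if ch then "londres" else "california") :: tail)
      = refRec aL aC m i ch ++ tail := by
  intro i
  induction i with
  | zero =>
    intro ch pad tail hpad _
    rw [PySem.List.pyRange_neg_one_eq_nil (by norm_num)]
    obtain rfl : pad = [] := List.length_eq_zero_iff.mp hpad
    simp [refRec]
  | succ i ih =>
    intro ch pad tail hpad hn
    have hcast : ((i + 1 : Nat) : Int) - 1 = ((i : Nat) : Int) := by push_cast; ring
    rw [PySem.List.pyRange_neg_one_cons (by exact_mod_cast Nat.succ_pos i), hcast, List.foldl_cons]
    have hstep : stepRF aL aC m OL OC (pad ++ (if ch then "londres" else "california") :: tail) (((i : Nat) : Int) + 1)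
        = pad.take i ++ (if (if ch then (ptrAt aL aC m i).1 else !(ptrAt aL aC m i).2)
            then "londres" else "california")
            :: ((if ch then "londres" else "california") :: tail) := by
      have hc : ((i : Nat) : Int) + 1 = ((i + 1 : Nat) : Int) := by push_cast; ring
      have hcur : PySem.List.pyGetD (pad ++ (if ch then "londres" else "california") :: tail) (((i : Nat) : Int) + 1) ""
          = (if ch then "londres" else "california") := by
        rw [hc, PySem.List.pyGetD_natCast, ← hpad, getD_append_length]
      have hO1 : PySem.List.pyGetD OL (((i : Nat) : Int) + 1) 0 = (optP aL aC m (i+1)).1 := by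
        rw [hc, PySem.List.pyGetD_natCast]; exact hOL (i+1) (by omega)
      have hO1' : PySem.List.pyGetD OL (((i : Nat) : Int) + 1 - 1) 0 = (optP aL aC m i).1 := by
        rw [show ((i : Nat) : Int) + 1 - 1 = ((i : Nat) : Int) by ring, PySem.List.pyGetD_natCast]
        exact hOL i (by omega)
      have hO2 : PySem.List.pyGetD OC (((i : Nat) : Int) + 1) 0 = (optP aL aC m (i+1)).2 := by
        rw [hc, PySem.List.pyGetD_natCast]; exact hOC (i+1) (by omega)
      have hO2' : PySem.List.pyGetD OC (((i : Nat) : Int) + 1 - 1) 0 = (optP aL aC m i).2 := by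
        rw [show ((i : Nat) : Int) + 1 - 1 = ((i : Nat) : Int) by ring, PySem.List.pyGetD_natCast]
        exact hOC i (by omega)
      simp only [stepRF, hcur, hO1, hO1', hO2, hO2']
      have htest1 : ((optP aL aC m (i+1)).1
          == (optP aL aC m i).1 + PySem.List.pyGetD aL (((i : Nat) : Int) + 1) 0) = (ptrAt aL aC m i).1 := by
        simp only [optP, ptrAt]
        exact min_beq_left _ _
      have htest2 : ((optP aL aC m (i+1)).2
          == (optP aL aC m i).2 + PySem.List.pyGetD aC (((i : Nat) : Int) + 1) 0) = (ptrAt aL aC m i).2 := by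
        simp only [optP, ptrAt]
        exact min_beq_left _ _
      rw [htest1, htest2]
      rw [show (((i : Nat) : Int) + 1 - 1).toNat = i by omega]
      rw [show ((if ch then "londres" else "california") == "londres")
            = ch by cases ch <;> simp]
      rw [List.set_append_left _ _ (by omega),
          set_last_of_length pad i _ (by omega)]
      cases ch
      · cases (ptrAt aL aC m i).2 <;> simp
      · simp
    rw [show ((i + 1 : Nat) : Int) = ((i : Nat) : Int) + 1 from by push_cast; ring, hstep]
    rw [ih _ (pad.take i) _ (by simp [List.length_take]; omega) (by simp; omega)]
    simp only [refRec]
    simp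

theorem A_eq_ref (aL aC : List Int) (m : Int) (h1 : aL ≠ []) (h2 : aL.length ≤ aC.length) :
    plan_operativo3 aL aC m
      = refRec aL aC m (aL.length - 1)
          (decide ((optP aL aC m (aL.length - 1)).1 ≤ (optP aL aC m (aL.length - 1)).2)) := by
  have hn : 0 < aL.length := List.length_pos_iff.mpr h1
  have hlamA : (fun (st : List Int × List Int) (i : Int) =>
      let vL := min (PySem.List.pyGetD st.1 (i-1) 0 + PySem.List.pyGetD aL i 0)
                    (PySem.List.pyGetD st.2 (i-1) 0 + PySem.List.pyGetD aL i 0 + m)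
      let vC := min (PySem.List.pyGetD st.2 (i-1) 0 + PySem.List.pyGetD aC i 0)
                    (PySem.List.pyGetD st.1 (i-1) 0 + PySem.List.pyGetD aC i 0 + m)
      (st.1.set i.toNat vL, st.2.set i.toNat vC)) = stepAF aL aC m := rfl
  have hlamR : (fun (seq : List String) (i : Int) =>
      let v := if PySem.List.pyGetD seq i "" == "londres" then
          (if PySem.List.pyGetD
              ((PySem.List.pyRange 1 (aL.length : Int) 1).foldl (stepAF aL aC m)
                ((List.replicate aL.length (0 : Int)).set 0 (PySem.List.pyGetD aL 0 0),
                 (List.replicate aL.length (0 : Int)).set 0 (PySem.List.pyGetD aC 0 0))).1 i 0 ==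
              PySem.List.pyGetD ((PySem.List.pyRange 1 (aL.length : Int) 1).foldl (stepAF aL aC m)
                ((List.replicate aL.length (0 : Int)).set 0 (PySem.List.pyGetD aL 0 0),
                 (List.replicate aL.length (0 : Int)).set 0 (PySem.List.pyGetD aC 0 0))).1 (i-1) 0
              + PySem.List.pyGetD aL i 0
           then "londres" else "california")
        else
          (if PySem.List.pyGetD
              ((PySem.List.pyRange 1 (aL.length : Int) 1).foldl (stepAF aL aC m)
                ((List.replicate aL.length (0 : Int)).set 0 (PySem.List.pyGetD aL 0 0),
                 (List.replicate aL.length (0 : Int)).set 0 (PySem.List.pyGetD aC 0 0))).2 i 0 ==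
              PySem.List.pyGetD ((PySem.List.pyRange 1 (aL.length : Int) 1).foldl (stepAF aL aC m)
                ((List.replicate aL.length (0 : Int)).set 0 (PySem.List.pyGetD aL 0 0),
                 (List.replicate aL.length (0 : Int)).set 0 (PySem.List.pyGetD aC 0 0))).2 (i-1) 0
              + PySem.List.pyGetD aC i 0
           then "california" else "londres")
      seq.set (i-1).toNat v)
      = stepRF aL aC m
          ((PySem.List.pyRange 1 (aL.length : Int) 1).foldl (stepAF aL aC m)
            ((List.replicate aL.length (0 : Int)).set 0 (PySem.List.pyGetD aL 0 0),
             (List.replicate aL.length (0 : Int)).set 0 (PySem.List.pyGetD aC 0 0))).1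
          ((PySem.List.pyRange 1 (aL.length : Int) 1).foldl (stepAF aL aC m)
            ((List.replicate aL.length (0 : Int)).set 0 (PySem.List.pyGetD aL 0 0),
             (List.replicate aL.length (0 : Int)).set 0 (PySem.List.pyGetD aC 0 0))).2 := rfl
  obtain ⟨hl1, hl2, h3⟩ := fwA_spec aL aC m hn aL.length le_rfl
  set OPT := (PySem.List.pyRange 1 (aL.length : Int) 1).foldl (stepAF aL aC m)
      ((List.replicate aL.length (0 : Int)).set 0 (PySem.List.pyGetD aL 0 0),
       (List.replicate aL.length (0 : Int)).set 0 (PySem.List.pyGetD aC 0 0)) with hOPT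
  have hgetD_of_last : ∀ (xs : List Int), xs.length = aL.length →
      PySem.List.pyGetD xs (-1) 0 = xs.getD (aL.length - 1) 0 := by
    intro xs hx
    have hne : xs ≠ [] := by intro h; rw [h] at hx; simp at hx; omega
    rw [PySem.List.pyGetD_neg_one xs 0 hne, List.getLast_eq_getElem,
        List.getD_eq_getElem _ _ (by omega)]
    simp [hx]
  have hL1 : PySem.List.pyGetD OPT.1 (-1) 0 = (optP aL aC m (aL.length - 1)).1 := by
    rw [hgetD_of_last OPT.1 hl1]; exact (h3 (aL.length - 1) (by omega)).1
  have hL2 : PySem.List.pyGetD OPT.2 (-1) 0 = (optP aL aC m (aL.length - 1)).2 := by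
    rw [hgetD_of_last OPT.2 hl2]; exact (h3 (aL.length - 1) (by omega)).2
  have hseq0 : (List.replicate aL.length "").set (aL.length - 1)
        (if PySem.List.pyGetD OPT.1 (-1) 0 ≤ PySem.List.pyGetD OPT.2 (-1) 0 then "londres" else "california")
      = List.replicate (aL.length - 1) "" ++
        ((if decide ((optP aL aC m (aL.length - 1)).1 ≤ (optP aL aC m (aL.length - 1)).2)
           then "londres" else "california") :: []) := by
    rw [set_last_of_length _ _ _ (by simp; omega), List.take_replicate, hL1, hL2]
    simp [min_eq_left (by omega : aL.length - 1 ≤ aL.length)]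
  have hrange : ((aL.length : Int) - 1) = (((aL.length - 1 : Nat)) : Int) := by omega
  unfold plan_operativo3
  simp only [hlamA, hlamR, ← hOPT, hseq0, hrange]
  rw [bkA_spec aL aC m OPT.1 OPT.2
        (fun j hj => (h3 j hj).1) (fun j hj => (h3 j hj).2)
        (aL.length - 1) _ (List.replicate (aL.length - 1) "") []
        (by simp) (by simp; omega)]
  simp

-- ===== VERDICT (by name: the statement is the Claim_ definition above) =====
theorem plan_operativo3_spec : Claim_equal_plan_operativo3 := by
  intro aL aC m _ hpre
  unfold Spec_plan_operativo3
  rw [A_eq_ref aL aC m hpre.1 hpre.2, B_eq_ref aL aC m hpre.1 hpre.2]
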